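-- pv_equiv track=rewrite | github.com/HarshalSawale4/Projects | manudriven.py | cric_footb_not_badm
-- ===== SOURCE A (Python) =====
-- def cric_footb_not_badm(groupA_cricket, groupB_badminton, groupC_football):
--     cricket_football_not_badminton = []
--     cricket_stu= []
--     footbal_stu= []
--
--
--     for student in groupA_cricket:
--         if student not in cricket_stu:
--             cricket_stu.append(student)
--
--     for student in groupC_football:
--         if student not in footbal_stu:
--             footbal_stu.append(student)
--
--     for student in cricket_stu:
--         if student not in footbal_stu and student not in groupB_badminton:
--             cricket_football_not_badminton.append(student)
--     return len(cricket_football_not_badminton)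
-- ===== SOURCE B (Python) =====
-- def cric_footb_not_badm(groupA_cricket, groupB_badminton, groupC_football):
--     # Consume a working copy of the cricket list as a stack, back to front:
--     # a popped student is counted exactly when it is its FIRST occurrence
--     # (absent from what is still on the stack) and in neither other group.
--     # No dedup lists are ever built.
--     count = 0
--     rest = list(groupA_cricket)
--     while rest:
--         s = rest.pop()
--         if s not in rest and s not in groupB_badminton and s not in groupC_football:
--             count += 1
--     return count
-- ===== Notes on version B (the rewrite author's own statement) =====
-- stated objective: alternative
-- what changed: A stages three loops that build two dedup lists and a filtered result list and returns its length; B consumes a working copy of the cricket list as a stack (pop from the back) in one destructive loop with a counter, counting each qualifying student at its first occurrence, building no intermediate lists.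
import Mathlib
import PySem

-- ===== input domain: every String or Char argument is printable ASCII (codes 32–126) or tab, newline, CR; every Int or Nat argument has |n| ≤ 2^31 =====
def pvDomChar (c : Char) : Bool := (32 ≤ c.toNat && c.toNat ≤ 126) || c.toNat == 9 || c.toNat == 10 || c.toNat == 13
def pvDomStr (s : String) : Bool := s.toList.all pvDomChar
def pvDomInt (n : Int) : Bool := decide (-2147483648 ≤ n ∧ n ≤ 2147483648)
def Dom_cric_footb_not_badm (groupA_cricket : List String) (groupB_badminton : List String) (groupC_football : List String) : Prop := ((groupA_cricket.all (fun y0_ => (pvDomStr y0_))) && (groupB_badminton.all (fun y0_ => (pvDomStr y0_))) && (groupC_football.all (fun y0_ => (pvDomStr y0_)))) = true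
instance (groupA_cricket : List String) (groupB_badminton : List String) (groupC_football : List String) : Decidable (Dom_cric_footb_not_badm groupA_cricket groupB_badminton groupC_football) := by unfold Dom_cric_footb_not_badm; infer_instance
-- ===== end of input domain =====

-- B replaces A's three staged loops (two dedup lists + a filtered result list) by one
-- destructive stack loop popping the cricket list back to front and counting each
-- qualifying student at its first occurrence; an alternative decomposition.
-- (B mutates only its own copy `list(groupA_cricket)`; the arguments are untouched.)

-- ===== PORT A =====
def cric_footb_not_badm (groupA_cricket : List String) (groupB_badminton : List String) (groupC_football : List String) : Int :=
  -- cricket_stu: dedup groupA_cricket by membership test + append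
  let cricket_stu := groupA_cricket.foldl
    (fun acc student => if acc.contains student then acc else acc ++ [student]) []
  -- footbal_stu: dedup groupC_football the same way
  let footbal_stu := groupC_football.foldl
    (fun acc student => if acc.contains student then acc else acc ++ [student]) []
  -- collect cricket students not in footbal_stu and not in groupB_badminton
  let cricket_football_not_badminton := cricket_stu.foldl
    (fun acc student =>
      if !footbal_stu.contains student && !groupB_badminton.contains student
      then acc ++ [student] else acc) []
  (cricket_football_not_badminton.length : Int)

-- ===== PORT B =====
-- the while loop of Source B: `s = rest.pop()` is the last element (getLast?) and the
-- shrunken stack is dropLast; bump `count` when s is absent from the remaining stack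
-- and from both other groups
def cfnbLoop (groupB_badminton : List String) (groupC_football : List String) :
    List String → Int → Int
  | rest, count =>
    match h : rest.getLast? with
    | none => count
    | some s =>
      let rest' := rest.dropLast
      cfnbLoop groupB_badminton groupC_football rest'
        (if !rest'.contains s && !groupB_badminton.contains s && !groupC_football.contains s
         then count + 1 else count)
  termination_by rest _ => rest.length
  decreasing_by
    have : rest ≠ [] := by intro hn; rw [hn] at h; simp at h
    simpa [List.length_dropLast] using Nat.sub_lt (List.length_pos_iff.mpr this) Nat.one_pos

def cric_footb_not_badm_alt (groupA_cricket : List String) (groupB_badminton : List String) (groupC_football : List String) : Int :=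
  cfnbLoop groupB_badminton groupC_football groupA_cricket 0

-- ===== PRECONDITION & SPEC =====
def Spec_cric_footb_not_badm (groupA_cricket : List String) (groupB_badminton : List String) (groupC_football : List String) (out : Int) : Prop := out = cric_footb_not_badm_alt groupA_cricket groupB_badminton groupC_football
instance (groupA_cricket : List String) (groupB_badminton : List String) (groupC_football : List String) (out : Int) : Decidable (Spec_cric_footb_not_badm groupA_cricket groupB_badminton groupC_football out) := by unfold Spec_cric_footb_not_badm; infer_instance

-- ===== CLAIM (what is proved, stated in full; the proofs are below) =====
def Claim_equal_cric_footb_not_badm : Prop := ∀ (groupA_cricket : List String) (groupB_badminton : List String) (groupC_football : List String), Dom_cric_footb_not_badm groupA_cricket groupB_badminton groupC_football → Spec_cric_footb_not_badm groupA_cricket groupB_badminton groupC_football (cric_footb_not_badm groupA_cricket groupB_badminton groupC_football)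

-- ===== LEMMAS AND PROOFS =====

-- the common predicate: not in groupB_badminton, not in groupC_football
def cfnbP (B C : List String) (s : String) : Bool := !B.contains s && !C.contains s

lemma cfnbLoop_nil (B C : List String) (count : Int) : cfnbLoop B C [] count = count := by
  rw [cfnbLoop]
  rfl

lemma cfnbLoop_concat (B C : List String) (l : List String) (s : String) (count : Int) :
    cfnbLoop B C (l ++ [s]) count
      = cfnbLoop B C l (if !l.contains s && cfnbP B C s then count + 1 else count) := by
  rw [cfnbLoop]
  split
  next h => simp at h
  next s' h =>
    rw [List.getLast?_concat] at h
    cases h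
    simp [cfnbP, Bool.and_assoc]

-- B's loop counts exactly the members of the first-occurrence dedup (PySem.Set.ofList)
-- that satisfy the predicate.
lemma cfnbLoop_eq (B C : List String) (l : List String) (count : Int) :
    cfnbLoop B C l count = count + (((PySem.Set.ofList l).filter (cfnbP B C)).length : Int) := by
  induction l using List.reverseRecOn generalizing count with
  | nil => simp [cfnbLoop_nil, PySem.Set.ofList]
  | append_singleton l s ih =>
    rw [cfnbLoop_concat, ih, PySem.Set.ofList_append_singleton]
    by_cases hm : s ∈ l
    · have hc : l.contains s = true := by simpa using hm
      rw [PySem.Set.add_of_mem ((PySem.Set.mem_ofList l s).mpr hm), hc]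
      simp
    · have hc : l.contains s = false := by simpa using hm
      rw [PySem.Set.add_of_not_mem (fun hh => hm ((PySem.Set.mem_ofList l s).mp hh)), hc]
      cases hq : cfnbP B C s <;>
        simp [hq, List.filter_append]
      ring

-- A's dedup loop is exactly PySem.Set.ofList (foldl of Set.add over []).
lemma cfnb_dedup_loop_eq_ofList (xs : List String) :
    xs.foldl (fun acc student => if acc.contains student then acc else acc ++ [student]) []
      = PySem.Set.ofList xs := by
  rw [PySem.Set.ofList_eq_foldl]
  rfl

-- A's third-loop predicate agrees with cfnbP (footbal_stu has exactly C's members).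
lemma cfnb_pred_eq (B C : List String) (x : String) :
    (!(PySem.Set.ofList C).contains x && !B.contains x) = cfnbP B C x := by
  have hc : (PySem.Set.ofList C).contains x = C.contains x := by
    by_cases h : x ∈ C
    · have h1 : x ∈ PySem.Set.ofList C := (PySem.Set.mem_ofList C x).mpr h
      simp_all
    · have h1 : x ∉ PySem.Set.ofList C := fun hh => h ((PySem.Set.mem_ofList C x).mp hh)
      simp_all
  rw [cfnbP, hc, Bool.and_comm]

-- ===== VERDICT (by name: the statement is the Claim_ definition above) =====
theorem cric_footb_not_badm_spec : Claim_equal_cric_footb_not_badm := by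
  intro A B C _
  unfold Spec_cric_footb_not_badm cric_footb_not_badm cric_footb_not_badm_alt
  rw [cfnbLoop_eq]
  simp only [cfnb_dedup_loop_eq_ofList, PySem.List.foldl_append_if_eq_filter,
    List.nil_append, zero_add]
  exact congrArg (fun l : List String => (l.length : Int))
    (List.filter_congr (fun x _ => cfnb_pred_eq B C x))
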